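-- pv_equiv track=rewrite | github.com/imRushabhShah/RS-BOT | responce.py | entityResp
-- ===== SOURCE A (Python) =====
-- def entityResp(entities):
--     resp=""
--     for x in entities:
--         if 'greetings'==x[0]:
--             resp+="hi this is bot\n"
--     for x in entities:
--         if 'Username'==x[0]:
--             resp+="nice to meet you "+x[1]+"\n"
--     for x in entities:
--         if 'UserLocation'==x[0]:
--             resp+=str(x[1])+" looks like a wonderful place"+"\n"
--     if(resp==""):
--         resp+="great to hear that, tell me more about yourself"
--     else:
--         resp+="tell me more"
--     return(resp)
-- ===== SOURCE B (Python) =====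
-- def entityResp(entities):
--     greetings_part = ""
--     user_part = ""
--     loc_part = ""
--     for x in entities:
--         if x[0] == 'greetings':
--             greetings_part += "hi this is bot\n"
--         elif x[0] == 'Username':
--             user_part += "nice to meet you " + x[1] + "\n"
--         elif x[0] == 'UserLocation':
--             loc_part += str(x[1]) + " looks like a wonderful place\n"
--     resp = greetings_part + user_part + loc_part
--     if resp == "":
--         return resp + "great to hear that, tell me more about yourself"
--     return resp + "tell me more"
-- ===== Notes on version B (the rewrite author's own statement) =====
-- stated objective: simpler
-- what changed: Replaces A's three separate passes over the entity list with a single pass that dispatches each entity into one of three category accumulators, concatenated in the fixed category order at the end.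
import Mathlib
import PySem

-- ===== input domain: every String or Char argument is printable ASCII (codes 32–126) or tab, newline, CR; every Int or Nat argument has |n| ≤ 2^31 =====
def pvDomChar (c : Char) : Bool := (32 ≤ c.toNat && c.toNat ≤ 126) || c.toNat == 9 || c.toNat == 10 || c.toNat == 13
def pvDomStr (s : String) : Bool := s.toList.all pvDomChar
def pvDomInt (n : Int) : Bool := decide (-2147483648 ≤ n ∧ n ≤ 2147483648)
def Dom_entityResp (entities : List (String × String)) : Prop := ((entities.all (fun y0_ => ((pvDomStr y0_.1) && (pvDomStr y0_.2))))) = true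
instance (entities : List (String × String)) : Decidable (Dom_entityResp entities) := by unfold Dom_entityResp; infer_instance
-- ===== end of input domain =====

-- B replaces A's three passes over the list with one pass into three category accumulators (objective: simpler).

-- ===== PORT A =====
def entityResp (entities : List (String × String)) : String :=
  let r0 : String := ""
  let r1 := entities.foldl (fun resp x =>
    if "greetings" = x.1 then resp ++ "hi this is bot\n" else resp) r0
  let r2 := entities.foldl (fun resp x =>
    if "Username" = x.1 then resp ++ ("nice to meet you " ++ x.2 ++ "\n") else resp) r1
  let r3 := entities.foldl (fun resp x =>
    if "UserLocation" = x.1 then resp ++ (x.2 ++ " looks like a wonderful place" ++ "\n") else resp) r2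
  if r3 = "" then r3 ++ "great to hear that, tell me more about yourself"
  else r3 ++ "tell me more"

-- ===== PORT B =====
def entityResp_alt (entities : List (String × String)) : String :=
  let acc := entities.foldl (fun (s : String × String × String) x =>
    if x.1 = "greetings" then (s.1 ++ "hi this is bot\n", s.2.1, s.2.2)
    else if x.1 = "Username" then (s.1, s.2.1 ++ ("nice to meet you " ++ x.2 ++ "\n"), s.2.2)
    else if x.1 = "UserLocation" then (s.1, s.2.1, s.2.2 ++ (x.2 ++ " looks like a wonderful place\n"))
    else s) ("", "", "")
  let resp := acc.1 ++ acc.2.1 ++ acc.2.2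
  if resp = "" then resp ++ "great to hear that, tell me more about yourself"
  else resp ++ "tell me more"

-- ===== PRECONDITION & SPEC =====
def Spec_entityResp (entities : List (String × String)) (out : String) : Prop := out = entityResp_alt entities
instance (entities : List (String × String)) (out : String) : Decidable (Spec_entityResp entities out) := by unfold Spec_entityResp; infer_instance

-- ===== CLAIM (what is proved, stated in full; the proofs are below) =====
def Claim_equal_entityResp : Prop := ∀ (entities : List (String × String)), Dom_entityResp entities → Spec_entityResp entities (entityResp entities)

-- ===== LEMMAS AND PROOFS =====

-- a fold of shape 'if p x then r ++ f x else r' distributes over its start accumulator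
theorem pv_foldl_if_append (f : String × String → String) (p : String × String → Prop)
    [DecidablePred p] (l : List (String × String)) (a : String) :
    l.foldl (fun r x => if p x then r ++ f x else r) a
      = a ++ l.foldl (fun r x => if p x then r ++ f x else r) "" := by
  induction l generalizing a with
  | nil => simp
  | cons hd tl ih =>
    by_cases h : p hd
    · rw [List.foldl_cons, List.foldl_cons, if_pos h, if_pos h,
        ih (a ++ f hd), ih ("" ++ f hd)]
      simp [String.append_assoc]
    · rw [List.foldl_cons, List.foldl_cons, if_neg h, if_neg h, ih a]

-- B's single triple fold computes the three single folds componentwise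
theorem pv_triple_fold (l : List (String × String)) (g u lo : String) :
    l.foldl (fun (s : String × String × String) x =>
      if x.1 = "greetings" then (s.1 ++ "hi this is bot\n", s.2.1, s.2.2)
      else if x.1 = "Username" then (s.1, s.2.1 ++ ("nice to meet you " ++ x.2 ++ "\n"), s.2.2)
      else if x.1 = "UserLocation" then (s.1, s.2.1, s.2.2 ++ (x.2 ++ " looks like a wonderful place\n"))
      else s) (g, u, lo)
    = (l.foldl (fun resp x => if "greetings" = x.1 then resp ++ "hi this is bot\n" else resp) g,
       l.foldl (fun resp x => if "Username" = x.1 then resp ++ ("nice to meet you " ++ x.2 ++ "\n") else resp) u,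
       l.foldl (fun resp x => if "UserLocation" = x.1 then resp ++ (x.2 ++ " looks like a wonderful place\n") else resp) lo) := by
  induction l generalizing g u lo with
  | nil => simp
  | cons hd tl ih =>
    by_cases h1 : hd.1 = "greetings"
    · simp [List.foldl_cons, h1, ih]
    · by_cases h2 : hd.1 = "Username"
      · simp [List.foldl_cons, h2, ih]
      · by_cases h3 : hd.1 = "UserLocation"
        · simp [List.foldl_cons, h3, ih]
        · simp [List.foldl_cons, h1, h2, h3, Ne.symm h1, Ne.symm h2, Ne.symm h3, ih]

-- A writes the location line as two appended literals; as a string it is B's single literal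
theorem pv_locfun_eq :
    (fun (resp : String) (x : String × String) =>
      if "UserLocation" = x.1 then resp ++ (x.2 ++ " looks like a wonderful place" ++ "\n") else resp)
    = (fun (resp : String) (x : String × String) =>
      if "UserLocation" = x.1 then resp ++ (x.2 ++ " looks like a wonderful place\n") else resp) := by
  funext resp x
  rw [String.append_assoc]
  rfl

-- ===== VERDICT (by name: the statement is the Claim_ definition above) =====
theorem entityResp_spec : Claim_equal_entityResp := by
  intro entities _
  show entityResp entities = entityResp_alt entities
  unfold entityResp entityResp_alt
  rw [pv_locfun_eq, pv_triple_fold]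
  simp only []
  rw [pv_foldl_if_append (fun x => "nice to meet you " ++ x.2 ++ "\n") (fun x => "Username" = x.1),
      pv_foldl_if_append (fun x => x.2 ++ " looks like a wonderful place\n") (fun x => "UserLocation" = x.1)]
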